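-- pv_equiv track=rewrite | github.com/Anish005/python_dsa | CodingTestQs/playsegment.py | playSegments
-- ===== SOURCE A (Python) =====
-- def playSegments(coins):
--     total_coins = coins.count(1)
--     total_segments = len(coins)
--
--     player1_score = 0
--     player2_score = total_coins
--
--     min_segments = total_segments + 1
--
--     for i in range(total_segments):
--         if coins[i] == 1:
--             player1_score += 1
--             player2_score -= 1
--
--         if player1_score > player2_score:
--             min_segments = min(min_segments, i + 1)
--
--     return min_segments if min_segments <= total_segments else 0
-- ===== SOURCE B (Python) =====
-- def playSegments(coins):
--     # staged algorithm: build the prefix-sum array of 1-coins, then binary search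
--     # (the predicate 2*P[k] > total is monotone in k) for the least qualifying prefix
--     P = [0]
--     for c in coins:
--         P.append(P[-1] + (1 if c == 1 else 0))
--     total = P[-1]
--     if total == 0:
--         return 0
--     lo, hi = 1, len(coins)
--     while lo < hi:
--         mid = (lo + hi) // 2
--         if 2 * P[mid] > total:
--             hi = mid
--         else:
--             lo = mid + 1
--     return lo
-- ===== Notes on version B (the rewrite author's own statement) =====
-- stated objective: alternative
-- what changed: B first materialises the prefix-sum array of 1-coins in a staged pass, then binary searches that array for the least prefix whose ones-count strictly exceeds half the total (the predicate is monotone), instead of A's single pass maintaining two player scores and a running minimum.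
import Mathlib
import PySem

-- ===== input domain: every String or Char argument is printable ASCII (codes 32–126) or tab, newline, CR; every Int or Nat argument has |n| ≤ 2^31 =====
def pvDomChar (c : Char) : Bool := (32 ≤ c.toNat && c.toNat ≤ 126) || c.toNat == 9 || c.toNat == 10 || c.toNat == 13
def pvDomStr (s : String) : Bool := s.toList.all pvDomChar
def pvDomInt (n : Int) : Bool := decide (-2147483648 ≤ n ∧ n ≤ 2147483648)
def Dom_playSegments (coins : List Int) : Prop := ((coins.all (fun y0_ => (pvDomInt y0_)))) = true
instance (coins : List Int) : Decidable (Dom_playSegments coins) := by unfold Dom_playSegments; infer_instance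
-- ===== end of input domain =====

-- B replaces A's single pass with two player scores and a running minimum by a staged
-- algorithm: build the prefix-sum array of 1-coins, then binary search it for the least
-- prefix whose ones-count strictly exceeds half the total (alternative decomposition, same value).

-- ===== PORT A =====
-- step of A's loop: state (player1_score, player2_score, min_segments, i)
def stepA (st : Int × Int × Int × Int) (c : Int) : Int × Int × Int × Int :=
  let p1 := if c = 1 then st.1 + 1 else st.1
  let p2 := if c = 1 then st.2.1 - 1 else st.2.1
  let m := if p1 > p2 then min st.2.2.1 (st.2.2.2 + 1) else st.2.2.1
  (p1, p2, m, st.2.2.2 + 1)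

def playSegments (coins : List Int) : Int :=
  let totalCoins : Int := (PySem.List.count coins 1 : Nat)
  let totalSegments : Int := (coins.length : Nat)
  let s := coins.foldl stepA (0, totalCoins, totalSegments + 1, 0)
  if s.2.2.1 ≤ totalSegments then s.2.2.1 else 0

-- ===== PORT B =====
-- Python: P = [0]; for c in coins: P.append(P[-1] + (1 if c == 1 else 0))
def stepB (P : List Int) (c : Int) : List Int :=
  P ++ [(P.getLast?.getD 0) + (if c = 1 then 1 else 0)]   -- P[-1]: P is never empty, exact

-- Python while loop: lo, hi are always in 0..len(coins), nonnegative, so Nat with Nat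
-- division (lo+hi)/2 matches Python's //; P[mid] is always in range, so getD is exact.
def bsearch (P : List Int) (total : Int) (lo hi : Nat) : Nat :=
  if _h : lo < hi then
    let mid := (lo + hi) / 2
    if 2 * (P.getD mid 0) > total then bsearch P total lo mid
    else bsearch P total (mid + 1) hi
  else lo
termination_by hi - lo
decreasing_by
  · omega
  · omega

def playSegments_alt (coins : List Int) : Int :=
  let P := coins.foldl stepB [0]
  let total := P.getLast?.getD 0      -- P[-1]: P nonempty, exact
  if total = 0 then 0
  else (bsearch P total 1 coins.length : Int)

-- ===== PRECONDITION & SPEC =====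
def Spec_playSegments (coins : List Int) (out : Int) : Prop := out = playSegments_alt coins
instance (coins : List Int) (out : Int) : Decidable (Spec_playSegments coins out) := by unfold Spec_playSegments; infer_instance

-- ===== CLAIM (what is proved, stated in full; the proofs are below) =====
def Claim_equal_playSegments : Prop := ∀ (coins : List Int), Dom_playSegments coins → Spec_playSegments coins (playSegments coins)

-- ===== LEMMAS AND PROOFS =====

def onesI (xs : List Int) : Int := ((PySem.List.count xs 1 : Nat) : Int)

theorem onesI_cons (c : Int) (xs : List Int) :
    onesI (c :: xs) = (if c = 1 then 1 else 0) + onesI xs := by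
  simp [onesI, PySem.List.count_eq, List.count_cons]
  by_cases h : c = 1 <;> simp [h] <;> omega

theorem onesI_nonneg (xs : List Int) : 0 ≤ onesI xs := by
  simp [onesI]

-- proof-side reference function: early-returning scan with a single counter
def altGo (need : Int) : List Int → Int → Int → Int
  | [], _, _ => 0
  | c :: rest, cnt, i =>
      let cnt := if c = 1 then cnt + 1 else cnt
      if cnt ≥ need then i + 1 else altGo need rest cnt (i + 1)

-- once the min register is ≤ i + 1, the rest of A's loop never changes it
theorem foldA_min_frozen (rest : List Int) :
    ∀ (p1 p2 m i : Int), m ≤ i + 1 →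
      (rest.foldl stepA (p1, p2, m, i)).2.2.1 = m := by
  induction rest with
  | nil => intro p1 p2 m i h; simp
  | cons c rest ih =>
      intro p1 p2 m i h
      have hmin : min m (i + 1) = m := by omega
      simp only [List.foldl_cons, stepA, hmin, ite_self]
      exact ih _ _ _ _ (by omega)

-- main invariant: the not-yet-found state of A's loop vs the reference scan
theorem main_inv (rest : List Int) :
    ∀ (cnt i N : Int), cnt ≤ onesI rest → i + (rest.length : Int) ≤ N →
      (if ((rest.foldl stepA (cnt, onesI rest, N + 1, i)).2.2.1) ≤ N
       then (rest.foldl stepA (cnt, onesI rest, N + 1, i)).2.2.1 else 0)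
        = altGo ((cnt + onesI rest) / 2 + 1) rest cnt i := by
  induction rest with
  | nil =>
      intro cnt i N _ _
      simp only [List.foldl_nil, altGo]
      rw [if_neg (by omega : ¬ N + 1 ≤ N)]
  | cons c rest ih =>
      intro cnt i N hcnt hN
      have hnn := onesI_nonneg rest
      have hones := onesI_cons c rest
      have hlen : i + 1 + (rest.length : Int) ≤ N := by
        simp only [List.length_cons] at hN; push_cast at hN ⊢; omega
      simp only [List.foldl_cons, altGo, stepA]
      by_cases hcc : c = 1
      · simp only [hcc, if_true] at hones hcnt ⊢
        rw [hones]
        rw [show (1 : Int) + onesI rest - 1 = onesI rest from by omega]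
        by_cases hfound : cnt + 1 > onesI rest
        · rw [if_pos hfound,
              show min (N + 1) (i + 1) = i + 1 from by omega,
              foldA_min_frozen rest (cnt + 1) (onesI rest) (i + 1) (i + 1) (by omega),
              if_pos (by omega : i + 1 ≤ N),
              if_pos (by omega : cnt + 1 ≥ (cnt + (1 + onesI rest)) / 2 + 1)]
        · rw [if_neg hfound,
              if_neg (by omega : ¬ cnt + 1 ≥ (cnt + (1 + onesI rest)) / 2 + 1),
              show cnt + (1 + onesI rest) = (cnt + 1) + onesI rest from by ring]
          exact ih (cnt + 1) (i + 1) N (by omega) hlen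
      · simp only [if_neg hcc]
        rw [hones, show ((if c = 1 then (1 : Int) else 0) + onesI rest) = onesI rest
              from by rw [if_neg hcc]; omega] at *
        by_cases hfound : cnt > onesI rest
        · rw [if_pos hfound,
              show min (N + 1) (i + 1) = i + 1 from by omega,
              foldA_min_frozen rest cnt (onesI rest) (i + 1) (i + 1) (by omega),
              if_pos (by omega : i + 1 ≤ N),
              if_pos (by omega : cnt ≥ (cnt + onesI rest) / 2 + 1)]
        · rw [if_neg hfound,
              if_neg (by omega : ¬ cnt ≥ (cnt + onesI rest) / 2 + 1)]
          exact ih cnt (i + 1) N (by omega) hlen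

theorem A_eq_altGo (coins : List Int) :
    playSegments coins = altGo (onesI coins / 2 + 1) coins 0 0 := by
  unfold playSegments
  have := main_inv coins 0 0 (coins.length : Int)
    (by simpa [onesI] using onesI_nonneg coins) (by omega)
  simpa [onesI] using this

-- ones in the first k coins
def onesTake (coins : List Int) (k : Nat) : Int := onesI (coins.take k)

theorem onesTake_zero (coins : List Int) : onesTake coins 0 = 0 := by
  simp [onesTake, onesI, PySem.List.count_eq]

theorem onesTake_cons_succ (c : Int) (rest : List Int) (k : Nat) :
    onesTake (c :: rest) (k + 1) = (if c = 1 then 1 else 0) + onesTake rest k := by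
  simp only [onesTake, List.take_succ_cons]
  exact onesI_cons c (rest.take k)

theorem onesTake_length (coins : List Int) : onesTake coins coins.length = onesI coins := by
  simp [onesTake]

theorem onesTake_mono (coins : List Int) :
    ∀ j k : Nat, j ≤ k → onesTake coins j ≤ onesTake coins k := by
  induction coins with
  | nil => intro j k _; simp [onesTake, onesI, PySem.List.count_eq]
  | cons c rest ih =>
      intro j k hjk
      match j, k with
      | 0, k =>
          rw [onesTake_zero]
          match k with
          | 0 => rw [onesTake_zero]
          | k + 1 =>
              rw [onesTake_cons_succ]
              have := onesI_nonneg (rest.take k)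
              have : 0 ≤ onesTake rest k := this
              by_cases h : c = 1 <;> simp [h] <;> omega
      | j + 1, k + 1 =>
          rw [onesTake_cons_succ, onesTake_cons_succ]
          have := ih j k (by omega)
          omega

-- characterisation of the early-returning scan when the target is reachable
theorem altGo_char (rest : List Int) :
    ∀ (cnt i need : Int), cnt < need → need ≤ cnt + onesI rest →
      ∃ r : Nat, 1 ≤ r ∧ r ≤ rest.length ∧ altGo need rest cnt i = i + (r : Int) ∧
        need ≤ cnt + onesTake rest r ∧ (∀ j : Nat, j < r → cnt + onesTake rest j < need) := by
  induction rest with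
  | nil =>
      intro cnt i need h1 h2
      exfalso; simp [onesI, PySem.List.count_eq] at h2; omega
  | cons c rest ih =>
      intro cnt i need h1 h2
      have hones := onesI_cons c rest
      simp only [altGo]
      by_cases hfound : (if c = 1 then cnt + 1 else cnt) ≥ need
      · refine ⟨1, le_refl _, by simp, ?_, ?_, ?_⟩
        · rw [if_pos hfound]; push_cast; ring
        · rw [onesTake_cons_succ, onesTake_zero]
          by_cases h : c = 1 <;> simp [h] at hfound ⊢ <;> omega
        · intro j hj
          interval_cases j
          rw [onesTake_zero]; omega
      · rw [if_neg hfound]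
        rw [hones] at h2
        have h2' : need ≤ (if c = 1 then cnt + 1 else cnt) + onesI rest := by
          by_cases h : c = 1 <;> simp [h] at h2 ⊢ <;> omega
        obtain ⟨r, hr1, hrlen, heq, hge, hlt⟩ :=
          ih (if c = 1 then cnt + 1 else cnt) (i + 1) need (by omega) h2'
        refine ⟨r + 1, by omega, by simp; omega, ?_, ?_, ?_⟩
        · rw [heq]; push_cast; ring
        · rw [onesTake_cons_succ]
          by_cases h : c = 1 <;> simp [h] at hge ⊢ <;> omega
        · intro j hj
          match j with
          | 0 => rw [onesTake_zero]; omega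
          | j + 1 =>
              rw [onesTake_cons_succ]
              have := hlt j (by omega)
              by_cases h : c = 1 <;> simp [h] at this ⊢ <;> omega

-- the scan returns 0 when the target is unreachable
theorem altGo_none (rest : List Int) :
    ∀ (cnt i need : Int), cnt + onesI rest < need → cnt < need →
      altGo need rest cnt i = 0 := by
  induction rest with
  | nil => intro cnt i need _ _; simp [altGo]
  | cons c rest ih =>
      intro cnt i need h hc
      have hones := onesI_cons c rest
      have hnn := onesI_nonneg rest
      rw [hones] at h
      simp only [altGo]
      have hsplit : (if c = 1 then cnt + 1 else cnt) + onesI rest < need ∧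
          (if c = 1 then cnt + 1 else cnt) < need := by
        by_cases hcc : c = 1 <;> simp [hcc] at h ⊢ <;> omega
      rw [if_neg (by omega : ¬ (if c = 1 then cnt + 1 else cnt) ≥ need)]
      exact ih _ _ _ hsplit.1 hsplit.2

-- shifted prefix sums, the contents B's first pass appends after the initial 0
def sums (s : Int) : List Int → List Int
  | [] => []
  | c :: rest => (s + (if c = 1 then 1 else 0)) :: sums (s + (if c = 1 then 1 else 0)) rest

theorem foldB_eq_sums (rest : List Int) :
    ∀ (acc : List Int), acc ≠ [] →
      rest.foldl stepB acc = acc ++ sums (acc.getLast?.getD 0) rest := by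
  induction rest with
  | nil => intro acc _; simp [sums]
  | cons c rest ih =>
      intro acc hacc
      simp only [List.foldl_cons, sums]
      rw [ih (stepB acc c) (by simp [stepB])]
      have hlast : (stepB acc c).getLast?.getD 0
          = acc.getLast?.getD 0 + (if c = 1 then 1 else 0) := by
        simp [stepB]
      rw [hlast, stepB]
      simp

theorem sums_getLast (rest : List Int) :
    ∀ s : Int, ((s :: sums s rest).getLast?).getD 0 = s + onesI rest := by
  induction rest with
  | nil => intro s; simp [sums, onesI, PySem.List.count_eq]
  | cons c rest ih =>
      intro s
      rw [onesI_cons]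
      simp only [sums, List.getLast?_cons_cons]
      have := ih (s + (if c = 1 then 1 else 0))
      rw [show (s + (if c = 1 then 1 else 0)) :: sums (s + (if c = 1 then 1 else 0)) rest
            = (s + (if c = 1 then 1 else 0)) :: sums (s + (if c = 1 then 1 else 0)) rest from rfl] at this
      rw [this]; ring

theorem sums_getD (rest : List Int) :
    ∀ (s : Int) (k : Nat), k < rest.length →
      (sums s rest).getD k 0 = s + onesTake rest (k + 1) := by
  induction rest with
  | nil => intro s k hk; simp at hk
  | cons c rest ih =>
      intro s k hk
      match k with
      | 0 =>
          simp only [sums, List.getD_cons_zero]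
          rw [onesTake_cons_succ, onesTake_zero]; ring
      | k + 1 =>
          simp only [sums, List.getD_cons_succ]
          rw [ih _ k (by simpa using hk), onesTake_cons_succ]; ring

-- prefList entry k (for k ≤ n) is the ones-count of the first k coins
theorem prefList_getD (coins : List Int) (k : Nat) (hk : k ≤ coins.length) :
    (coins.foldl stepB [0]).getD k 0 = onesTake coins k := by
  rw [foldB_eq_sums coins [0] (by simp)]
  simp only [List.getLast?_singleton, Option.getD_some]
  match k with
  | 0 => rw [onesTake_zero]; simp
  | k + 1 =>
      have hlt : k < coins.length := by omega
      simp only [List.singleton_append, List.getD_cons_succ]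
      have := sums_getD coins 0 k hlt
      simpa using this

theorem prefList_total (coins : List Int) :
    (coins.foldl stepB [0]).getLast?.getD 0 = onesI coins := by
  rw [foldB_eq_sums coins [0] (by simp)]
  have := sums_getLast coins 0
  simpa using this

-- binary-search correctness: with a monotone predicate, Q true at hi and false below lo,
-- the result is the least index satisfying Q
theorem bsearch_char (P : List Int) (total : Int) :
    ∀ (fuel lo hi : Nat), hi - lo ≤ fuel → lo ≤ hi →
      (∀ j k : Nat, j ≤ k → k ≤ hi → 2 * P.getD j 0 > total → 2 * P.getD k 0 > total) →
      2 * P.getD hi 0 > total → (∀ j : Nat, j < lo → ¬ (2 * P.getD j 0 > total)) →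
      lo ≤ bsearch P total lo hi ∧ bsearch P total lo hi ≤ hi ∧
        2 * P.getD (bsearch P total lo hi) 0 > total ∧
        (∀ j : Nat, j < bsearch P total lo hi → ¬ (2 * P.getD j 0 > total)) := by
  intro fuel
  induction fuel with
  | zero =>
      intro lo hi hfuel hle _mono hQ hbelow
      have heq : lo = hi := by omega
      subst heq
      rw [bsearch, dif_neg (lt_irrefl lo)]
      exact ⟨le_refl _, le_refl _, hQ, hbelow⟩
  | succ fuel ih =>
      intro lo hi hfuel hle mono hQ hbelow
      rw [bsearch]
      by_cases h : lo < hi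
      · rw [dif_pos h]
        by_cases hmid : 2 * P.getD ((lo + hi) / 2) 0 > total
        · rw [if_pos hmid]
          have := ih lo ((lo + hi) / 2) (by omega) (by omega)
            (fun j k hjk hk => mono j k hjk (by omega)) hmid hbelow
          exact ⟨this.1, by omega, this.2.2.1, this.2.2.2⟩
        · rw [if_neg hmid]
          have hbelow' : ∀ j : Nat, j < (lo + hi) / 2 + 1 → ¬ (2 * P.getD j 0 > total) := by
            intro j hj hQj
            by_cases hjlo : j < lo
            · exact hbelow j hjlo hQj
            · exact hmid (mono j ((lo + hi) / 2) (by omega) (by omega) hQj)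
          have := ih ((lo + hi) / 2 + 1) hi (by omega) (by omega) mono hQ hbelow'
          exact ⟨by omega, this.2.1, this.2.2.1, this.2.2.2⟩
      · rw [dif_neg h]
        have heq : lo = hi := by omega
        subst heq
        exact ⟨le_refl _, le_refl _, hQ, hbelow⟩

-- ===== VERDICT (by name: the statement is the Claim_ definition above) =====
theorem playSegments_spec : Claim_equal_playSegments := by
  intro coins _
  unfold Spec_playSegments playSegments_alt
  rw [A_eq_altGo]
  show altGo (onesI coins / 2 + 1) coins 0 0
      = if (coins.foldl stepB [0]).getLast?.getD 0 = 0 then 0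
        else ((bsearch (coins.foldl stepB [0]) ((coins.foldl stepB [0]).getLast?.getD 0)
                1 coins.length : Nat) : Int)
  rw [prefList_total]
  have htot := onesI_nonneg coins
  by_cases h0 : onesI coins = 0
  · rw [if_pos h0]
    exact altGo_none coins 0 0 (onesI coins / 2 + 1) (by omega) (by omega)
  · rw [if_neg h0]
    set P := coins.foldl stepB [0] with hP
    set n := coins.length with hn
    set total := onesI coins with htotal
    -- characterise A's side via the scan
    obtain ⟨r, hr1, hrn, heq, hge, hlt⟩ :=
      altGo_char coins 0 0 (total / 2 + 1) (by omega)
        (by rw [← htotal]; omega)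
    -- Q k := 2 * P.getD k 0 > total; monotone (careful above index n: getD = 0 there, Q false)
    have hPget : ∀ k : Nat, k ≤ n → P.getD k 0 = onesTake coins k := fun k hk =>
      prefList_getD coins k hk
    have mono : ∀ j k : Nat, j ≤ k → k ≤ n → 2 * P.getD j 0 > total → 2 * P.getD k 0 > total := by
      intro j k hjk hkn hQj
      rw [hPget j (by omega)] at hQj
      rw [hPget k hkn]
      have := onesTake_mono coins j k hjk
      omega
    have hQn : 2 * P.getD n 0 > total := by
      rw [hPget n (le_refl n), onesTake_length, ← htotal]; omega
    have hbelow1 : ∀ j : Nat, j < 1 → ¬ (2 * P.getD j 0 > total) := by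
      intro j hj
      interval_cases j
      rw [hPget 0 (by omega), onesTake_zero]; omega
    obtain ⟨hblo, hbhi, hbQ, hbmin⟩ :=
      bsearch_char P total n 1 n (by omega) (by omega) mono hQn hbelow1
    -- both r and bsearch result are the least k with Q; hence equal
    set b := bsearch P total 1 n with hb
    have hQA : 2 * P.getD r 0 > total := by
      rw [hPget r hrn]
      simp only [zero_add] at hge
      omega
    have hAmin : ∀ j : Nat, j < r → ¬ (2 * P.getD j 0 > total) := by
      intro j hj hQj
      have := hlt j hj
      rw [hPget j (by omega)] at hQj
      simp only [zero_add] at this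
      omega
    have hrb : r = b := by
      by_contra hne
      rcases Nat.lt_or_ge r b with h | h
      · exact hbmin r h hQA
      · rcases Nat.lt_or_ge b r with h2 | h2
        · exact hAmin b h2 hbQ
        · omega
    simp only [zero_add] at heq
    rw [heq, hrb]
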